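-- pv_equiv track=rewrite | github.com/AyushKashyapII/Pacman | play_dqn.py | convert_board_format
-- ===== SOURCE A (Python) =====
-- def convert_board_format(board_data):
--     rows = len(board_data)
--     cols = len(board_data[0])
--     converted_board = []
--     pacman_start = (23, 13)
--     ghost_starts = [(11, 13), (11, 14), (11, 15), (11, 16)]
--     for row in range(rows):
--         new_row = []
--         for col in range(cols):
--             cell = board_data[row][col]
--             if (row, col) == pacman_start:
--                 new_row.append('S')
--             elif (row, col) in ghost_starts:
--                 new_row.append('G')
--             elif cell == 0:
--                 new_row.append(' ')
--             elif cell == 1: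
--                 new_row.append('.')
--             elif cell == 2:
--                 new_row.append('P')
--             elif cell in [3, 4, 5, 6, 7, 8, 9]:
--                 new_row.append('W')
--             else:
--                 new_row.append(' ')
--         converted_board.append(''.join(new_row))
--     return converted_board
-- ===== SOURCE B (Python) =====
-- def convert_board_format(board_data):
--     rows = len(board_data)
--     cols = len(board_data[0])
--     table = ' .PWWWWWWW'
--     flat = [table[row[c]] if 0 <= row[c] <= 9 else ' '
--             for row in board_data for c in range(cols)]
--     if 23 < rows and 13 < cols:
--         flat[23 * cols + 13] = 'S'
--     if 11 < rows:
--         for c in (13, 14, 15, 16):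
--             if c < cols:
--                 flat[11 * cols + c] = 'G'
--     return [''.join(flat[r * cols:(r + 1) * cols]) for r in range(rows)]
-- ===== Notes on version B (the rewrite author's own statement) =====
-- stated objective: alternative
-- what changed: A fills a nested list with a fused per-cell if-chain (testing the special coordinates on every cell); B builds ONE flat character buffer by indexing a lookup string with the cell value, patches the five special cells by flat-index arithmetic (row*cols+col), and recovers the rows by slicing the flat buffer into cols-sized chunks.
import Mathlib
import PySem

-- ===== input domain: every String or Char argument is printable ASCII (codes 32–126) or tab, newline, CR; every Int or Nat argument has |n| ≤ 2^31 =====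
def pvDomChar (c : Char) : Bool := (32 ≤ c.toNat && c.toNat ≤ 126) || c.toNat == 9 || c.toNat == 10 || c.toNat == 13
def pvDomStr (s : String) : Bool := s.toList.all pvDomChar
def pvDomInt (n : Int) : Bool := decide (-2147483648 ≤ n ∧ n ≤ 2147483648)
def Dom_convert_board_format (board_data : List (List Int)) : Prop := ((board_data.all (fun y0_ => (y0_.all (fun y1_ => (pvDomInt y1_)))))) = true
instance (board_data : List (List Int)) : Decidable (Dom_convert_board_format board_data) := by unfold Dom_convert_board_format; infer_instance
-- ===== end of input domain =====

-- B replaces A's fused per-cell if-chain over a nested list by a flat character buffer: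
-- a lookup-string value pass produces one flat list, the five special cells are patched by
-- flat-index arithmetic (row*cols+col), and rows are recovered by slicing into cols-sized chunks.


-- ===== PORT A =====
def convert_board_format (board_data : List (List Int)) : List String :=
  let rows : Int := board_data.length
  let cols : Int := (PySem.List.pyGetD board_data 0 []).length
  (PySem.List.pyRange 0 rows).foldl (fun converted_board row =>
    let new_row : List Char :=
      (PySem.List.pyRange 0 cols).foldl (fun new_row col =>
        let cell : Int := PySem.List.pyGetD (PySem.List.pyGetD board_data row []) col 0
        if (row, col) = ((23 : Int), (13 : Int)) then new_row ++ ['S']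
        else if (row, col) ∈ [((11 : Int), (13 : Int)), (11, 14), (11, 15), (11, 16)] then new_row ++ ['G']
        else if cell = 0 then new_row ++ [' ']
        else if cell = 1 then new_row ++ ['.']
        else if cell = 2 then new_row ++ ['P']
        else if cell ∈ [(3 : Int), 4, 5, 6, 7, 8, 9] then new_row ++ ['W']
        else new_row ++ [' ']) []
    converted_board ++ [String.ofList new_row]) []

-- ===== PORT B =====
def convert_board_format_alt (board_data : List (List Int)) : List String :=
  let rows : Int := board_data.length
  let cols : Int := (PySem.List.pyGetD board_data 0 []).length
  let table : List Char := " .PWWWWWWW".toList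
  let flat : List Char := board_data.flatMap (fun row =>
    (PySem.List.pyRange 0 cols).map (fun c =>
      let v := PySem.List.pyGetD row c 0
      if 0 ≤ v ∧ v ≤ 9 then PySem.List.pyGetD table v ' ' else ' '))
  let flat1 : List Char :=
    if 23 < rows ∧ 13 < cols then flat.set (23 * cols + 13).toNat 'S' else flat
  let flat2 : List Char :=
    if 11 < rows then
      ([13, 14, 15, 16] : List Int).foldl (fun f c =>
        if c < cols then f.set (11 * cols + c).toNat 'G' else f) flat1
    else flat1
  (PySem.List.pyRange 0 rows).map (fun r =>
    String.ofList (PySem.List.slice flat2 (some (r * cols)) (some ((r + 1) * cols))))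

-- ===== PRECONDITION & SPEC =====
-- Pre_ excludes exactly the inputs on which A raises IndexError: the empty list (board_data[0])
-- and boards with a later row shorter than the first row (board_data[row][col]).
def Pre_convert_board_format (board_data : List (List Int)) : Prop :=
  board_data ≠ [] ∧ ∀ row ∈ board_data, (board_data.headD []).length ≤ row.length
instance (board_data : List (List Int)) : Decidable (Pre_convert_board_format board_data) := by
  unfold Pre_convert_board_format; infer_instance

def pvWitness_convert_board_format : List (List Int) := [[0, 1, 5], [2, -1, 3]]

def Spec_convert_board_format (board_data : List (List Int)) (out : List String) : Prop := out = convert_board_format_alt board_data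
instance (board_data : List (List Int)) (out : List String) : Decidable (Spec_convert_board_format board_data out) := by unfold Spec_convert_board_format; infer_instance

-- ===== CLAIM (what is proved, stated in full; the proofs are below) =====
def Claim_equal_convert_board_format : Prop := ∀ (board_data : List (List Int)), Dom_convert_board_format board_data → Pre_convert_board_format board_data → Spec_convert_board_format board_data (convert_board_format board_data)

-- ===== LEMMAS AND PROOFS =====

-- the plain value → character mapping (proof helper)
def cbfVal (v : Int) : Char :=
  if v = 0 then ' ' else if v = 1 then '.' else if v = 2 then 'P'
  else if 3 ≤ v ∧ v ≤ 9 then 'W' else ' '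

-- fused cell decision of A (proof helper)
def cbfA (row col cell : Int) : Char :=
  if (row, col) = ((23 : Int), (13 : Int)) then 'S'
  else if (row, col) ∈ [((11 : Int), (13 : Int)), (11, 14), (11, 15), (11, 16)] then 'G'
  else if cell = 0 then ' '
  else if cell = 1 then '.'
  else if cell = 2 then 'P'
  else if cell ∈ [(3 : Int), 4, 5, 6, 7, 8, 9] then 'W'
  else ' '

-- the unpatched character grid and the patched grid with the five special cells (proof helpers)
def cbfG0 (bd : List (List Int)) : List (List Char) :=
  bd.map (fun row =>
    (PySem.List.pyRange 0 (((PySem.List.pyGetD bd 0 []).length : Nat) : Int)).map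
      (fun c => cbfVal (PySem.List.pyGetD row c 0)))

def cbfGrid2 (bd : List (List Int)) : List (List Char) :=
  (((((cbfG0 bd).modify 23 (fun r => r.set 13 'S')).modify 11 (fun r => r.set 13 'G')).modify 11
      (fun r => r.set 14 'G')).modify 11 (fun r => r.set 15 'G')).modify 11 (fun r => r.set 16 'G')

theorem cbf_valA (cell : Int) :
  (if cell = 0 then ' ' else if cell = 1 then '.' else if cell = 2 then 'P'
   else if cell ∈ [(3:Int),4,5,6,7,8,9] then 'W' else ' ') = cbfVal cell := by
  unfold cbfVal
  by_cases h0 : cell = 0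
  · simp [h0]
  by_cases h1 : cell = 1
  · simp [h1]
  by_cases h2 : cell = 2
  · simp [h2]
  rw [if_neg h0, if_neg h1, if_neg h2, if_neg h0, if_neg h1, if_neg h2]
  by_cases hw : 3 ≤ cell ∧ cell ≤ 9
  · rw [if_pos (by simp; omega), if_pos hw]
  · rw [if_neg (by simp; omega), if_neg hw]

theorem cbf_valB (v : Int) :
  (if 0 ≤ v ∧ v ≤ 9 then PySem.List.pyGetD (" .PWWWWWWW".toList) v ' ' else ' ') = cbfVal v := by
  by_cases h : 0 ≤ v ∧ v ≤ 9
  · rw [if_pos h]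
    have : v = 0 ∨ v = 1 ∨ v = 2 ∨ v = 3 ∨ v = 4 ∨ v = 5 ∨ v = 6 ∨ v = 7 ∨ v = 8 ∨ v = 9 := by omega
    rcases this with rfl|rfl|rfl|rfl|rfl|rfl|rfl|rfl|rfl|rfl <;> decide
  · rw [if_neg h]
    unfold cbfVal
    rw [if_neg (by omega), if_neg (by omega), if_neg (by omega), if_neg (by omega)]

theorem innerA (bd : List (List Int)) (row : Int) (xs : List Int) (acc : List Char) :
    xs.foldl (fun new_row col =>
        let cell : Int := PySem.List.pyGetD (PySem.List.pyGetD bd row []) col 0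
        if (row, col) = ((23 : Int), (13 : Int)) then new_row ++ ['S']
        else if (row, col) ∈ [((11 : Int), (13 : Int)), (11, 14), (11, 15), (11, 16)] then new_row ++ ['G']
        else if cell = 0 then new_row ++ [' ']
        else if cell = 1 then new_row ++ ['.']
        else if cell = 2 then new_row ++ ['P']
        else if cell ∈ [(3 : Int), 4, 5, 6, 7, 8, 9] then new_row ++ ['W']
        else new_row ++ [' ']) acc
      = acc ++ xs.map (fun col => cbfA row col (PySem.List.pyGetD (PySem.List.pyGetD bd row []) col 0)) := by
  induction xs generalizing acc with
  | nil => simp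
  | cons c cs ih =>
      simp only [List.foldl_cons, List.map_cons, ih]
      have hb : (let cell : Int := PySem.List.pyGetD (PySem.List.pyGetD bd row []) c 0
        if (row, c) = ((23 : Int), (13 : Int)) then acc ++ ['S']
        else if (row, c) ∈ [((11 : Int), (13 : Int)), (11, 14), (11, 15), (11, 16)] then acc ++ ['G']
        else if cell = 0 then acc ++ [' ']
        else if cell = 1 then acc ++ ['.']
        else if cell = 2 then acc ++ ['P']
        else if cell ∈ [(3 : Int), 4, 5, 6, 7, 8, 9] then acc ++ ['W']
        else acc ++ [' '])
          = acc ++ [cbfA row c (PySem.List.pyGetD (PySem.List.pyGetD bd row []) c 0)] := by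
        simp only [cbfA]
        split_ifs <;> rfl
      rw [hb]
      simp

theorem A_norm (bd : List (List Int)) :
    convert_board_format bd
      = (PySem.List.pyRange 0 (bd.length : Int)).map (fun row =>
          String.ofList ((PySem.List.pyRange 0 (((PySem.List.pyGetD bd 0 []).length : Nat) : Int)).map
            (fun col => cbfA row col (PySem.List.pyGetD (PySem.List.pyGetD bd row []) col 0)))) := by
  unfold convert_board_format
  simp only [innerA, List.nil_append]
  rw [PySem.List.foldl_append_singleton_eq_map]
  simp

theorem inv_modify (g : List (List Char)) (C i c : Nat) (ch : Char)
    (hrows : ∀ j (h : j < g.length), g[j].length = C) :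
    ∀ j (h : j < (g.modify i (fun r => r.set c ch)).length),
      (g.modify i (fun r => r.set c ch))[j].length = C := by
  intro j h
  rw [List.getElem_modify]
  have hj : j < g.length := by simpa using h
  split_ifs <;> simp [List.length_set, hrows j hj]

theorem point_plain (r c : Nat) (v : Int) (hr23 : r ≠ 23 ∨ c ≠ 13)
    (hr11 : r ≠ 11 ∨ (c ≠ 13 ∧ c ≠ 14 ∧ c ≠ 15 ∧ c ≠ 16)) :
    cbfA (r : Int) (c : Int) v = cbfVal v := by
  unfold cbfA
  rw [if_neg (by simp [Prod.ext_iff]; omega), if_neg (by simp [Prod.ext_iff]; omega)]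
  exact cbf_valA v

theorem grid2_len (bd : List (List Int)) : (cbfGrid2 bd).length = bd.length := by
  simp [cbfGrid2, cbfG0]

theorem grid2_rows (bd : List (List Int)) :
    ∀ j (h : j < (cbfGrid2 bd).length),
      (cbfGrid2 bd)[j].length = (PySem.List.pyGetD bd 0 []).length := by
  unfold cbfGrid2
  apply inv_modify; apply inv_modify; apply inv_modify; apply inv_modify; apply inv_modify
  intro j h
  simp [cbfG0, PySem.List.pyRange_zero_natCast]

-- A equals the patched grid joined row-wise
theorem A_eq_mid (bd : List (List Int)) :
    convert_board_format bd = (cbfGrid2 bd).map String.ofList := by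
  rw [A_norm]
  have hlen := grid2_rows bd
  apply List.ext_getElem
  · simp [grid2_len, PySem.List.pyRange_zero_natCast]
  intro r h1 h2
  have hr : r < bd.length := by
    simpa [grid2_len] using h2
  simp only [PySem.List.pyRange_zero_natCast, List.map_map, List.getElem_map, List.getElem_range]
  refine congrArg String.ofList ?_
  set C := (PySem.List.pyGetD bd 0 []).length with hC
  apply List.ext_getElem
  · simpa [PySem.List.pyRange_zero_natCast] using (hlen r (by simpa [grid2_len] using hr)).symm
  intro c hc1 hc2
  have hcC : c < C := by simpa [PySem.List.pyRange_zero_natCast] using hc1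
  have hbd : PySem.List.pyGetD bd (r : Int) [] = bd[r] := by
    rw [PySem.List.pyGetD_natCast]
    exact List.getD_eq_getElem _ _ hr
  simp only [List.getElem_map, List.getElem_range, Function.comp, hbd]
  unfold cbfGrid2
  by_cases hr11 : (11 : Nat) = r
  · subst hr11
    simp [cbfG0, List.getElem_set, PySem.List.pyRange_zero_natCast]
    rcases eq_or_ne c 16 with h16 | h16
    · subst h16; simp [cbfA]
    rcases eq_or_ne c 15 with h15 | h15
    · subst h15; simp [cbfA]
    rcases eq_or_ne c 14 with h14 | h14
    · subst h14; simp [cbfA]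
    rcases eq_or_ne c 13 with h13 | h13
    · subst h13; simp [cbfA]
    rw [if_neg (fun h => h16 h.symm), if_neg (fun h => h15 h.symm),
        if_neg (fun h => h14 h.symm), if_neg (fun h => h13 h.symm)]
    exact point_plain 11 c _ (Or.inl (by omega)) (Or.inr ⟨h13, h14, h15, h16⟩)
  · by_cases hr23 : (23 : Nat) = r
    · subst hr23
      simp [cbfG0, List.getElem_set, PySem.List.pyRange_zero_natCast, fun h => hr11 h]
      rcases eq_or_ne c 13 with h13 | h13
      · subst h13; simp [cbfA]
      rw [if_neg (fun h => h13 h.symm)]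
      exact point_plain 23 c _ (Or.inr h13) (Or.inl (by omega))
    · simp [cbfG0, PySem.List.pyRange_zero_natCast, fun h => hr11 h, fun h => hr23 h]
      exact point_plain r c _ (Or.inl (by omega)) (Or.inl (by omega))

-- setting flat index i*C+c of the flattened grid is modifying row i at column c
theorem flat_set_modify (g : List (List Char)) (C i c : Nat) (ch : Char)
    (hrows : ∀ j (h : j < g.length), g[j].length = C) (hc : c < C) :
    g.flatten.set (i * C + c) ch = (g.modify i (fun r => r.set c ch)).flatten := by
  induction g generalizing i with
  | nil => simp
  | cons hd t ih =>
      have hhd : hd.length = C := hrows 0 (by simp)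
      have ht : ∀ j (h : j < t.length), t[j].length = C := by
        intro j h
        have := hrows (j + 1) (by simpa using Nat.succ_lt_succ h)
        simpa using this
      cases i with
      | zero =>
          simp only [List.flatten_cons, Nat.zero_mul, Nat.zero_add, List.modify_zero_cons] at *
          rw [List.set_append_left c ch (by omega)]
      | succ i =>
          have hidx : (i + 1) * C + c = hd.length + (i * C + c) := by
            rw [hhd]; ring
          simp only [List.flatten_cons, hidx, List.modify_succ_cons]
          rw [List.set_append_right _ _ (by omega)]
          simp only [Nat.add_sub_cancel_left]
          rw [ih i ht]

-- guarded flat set = unguarded row modify (out-of-range sets are identities)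
theorem flat_step (g : List (List Char)) (C i c : Nat) (ch : Char)
    (hrows : ∀ j (h : j < g.length), g[j].length = C) :
    (if i < g.length ∧ c < C then g.flatten.set (i * C + c) ch else g.flatten)
      = (g.modify i (fun r => r.set c ch)).flatten := by
  split_ifs with h
  · exact flat_set_modify g C i c ch hrows h.2
  · by_cases hi : i < g.length
    · have hcC : ¬ c < C := fun hc => h ⟨hi, hc⟩
      have hset : g[i].set c ch = g[i] :=
        List.set_eq_of_length_le (by rw [hrows i hi]; omega)
      rw [List.modify_eq_set, List.getElem?_eq_getElem hi]
      simp only [Option.getD_some, hset, List.set_getElem_self]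
    · rw [List.modify_eq_self (le_of_not_gt hi)]

-- chunking the flattened grid recovers the rows
theorem chunk_flatten (g : List (List Char)) (C : Nat)
    (hrows : ∀ j (h : j < g.length), g[j].length = C) :
    (List.range g.length).map (fun r => (g.flatten.drop (r * C)).take C) = g := by
  induction g with
  | nil => simp
  | cons hd t ih =>
      have hhd : hd.length = C := hrows 0 (by simp)
      have ht : ∀ j (h : j < t.length), t[j].length = C := by
        intro j h
        have := hrows (j + 1) (by simpa using Nat.succ_lt_succ h)
        simpa using this
      simp only [List.length_cons, List.range_succ_eq_map, List.map_cons, List.map_map]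
      congr 1
      · simp only [Nat.zero_mul, List.drop_zero, List.flatten_cons]
        exact List.take_left' hhd
      · have hstep : List.map ((fun r => ((hd :: t).flatten.drop (r * C)).take C) ∘ Nat.succ)
            (List.range t.length)
            = List.map (fun r => (t.flatten.drop (r * C)).take C) (List.range t.length) := by
          apply List.map_congr_left
          intro k _
          simp only [Function.comp]
          have hidx : (k + 1) * C = hd.length + k * C := by rw [hhd]; ring
          simp only [List.flatten_cons, hidx, List.drop_length_add_append]
        rw [hstep, ih ht]

-- slicing the flat buffer into C-sized chunks and joining recovers the rows
theorem final_chunk (g : List (List Char)) (C : Nat)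
    (hrows : ∀ j (h : j < g.length), g[j].length = C) :
    List.map ((fun r => String.ofList (PySem.List.slice g.flatten (some (r * ((C : Nat) : Int)))
        (some ((r + 1) * ((C : Nat) : Int))))) ∘ (fun k : Nat => (k : Int))) (List.range g.length)
      = List.map String.ofList g := by
  have h1 : List.map ((fun r => String.ofList (PySem.List.slice g.flatten (some (r * ((C : Nat) : Int)))
        (some ((r + 1) * ((C : Nat) : Int))))) ∘ (fun k : Nat => (k : Int))) (List.range g.length)
      = List.map (String.ofList ∘ fun r => (g.flatten.drop (r * C)).take C) (List.range g.length) := by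
    apply List.map_congr_left
    intro k _
    simp only [Function.comp]
    have hcast1 : ((k : Int) * ((C : Nat) : Int)) = (((k * C : Nat)) : Int) := by push_cast; ring
    have hcast2 : (((k : Int) + 1) * ((C : Nat) : Int)) = ((((k + 1) * C : Nat)) : Int) := by push_cast; ring
    rw [hcast1, hcast2, PySem.List.slice_natCast]
    have h3 : (k + 1) * C - k * C = C := by rw [Nat.succ_mul]; omega
    rw [h3]
  rw [h1, ← List.map_map, chunk_flatten g C hrows]

-- B equals the patched grid joined row-wise
theorem B_eq_mid (bd : List (List Int)) :
    convert_board_format_alt bd = (cbfGrid2 bd).map String.ofList := by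
  unfold convert_board_format_alt
  set C := (PySem.List.pyGetD bd 0 []).length with hC
  have hg0len : (cbfG0 bd).length = bd.length := by simp [cbfG0]
  have hg0rows : ∀ j (h : j < (cbfG0 bd).length), (cbfG0 bd)[j].length = C := by
    intro j h; simp [cbfG0, PySem.List.pyRange_zero_natCast, hC]
  -- the flat value pass is the flattened unpatched grid
  have hflat : bd.flatMap (fun row =>
      (PySem.List.pyRange 0 ((C : Nat) : Int)).map (fun c =>
        let v := PySem.List.pyGetD row c 0
        if 0 ≤ v ∧ v ≤ 9 then PySem.List.pyGetD (" .PWWWWWWW".toList) v ' ' else ' '))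
      = (cbfG0 bd).flatten := by
    rw [List.flatMap_def, cbfG0]
    congr 1
    apply List.map_congr_left
    intro row _
    apply List.map_congr_left
    intro c _
    exact cbf_valB (PySem.List.pyGetD row c 0)
  simp only [hflat]
  -- the S patch
  have hS : (if (23 : Int) < (bd.length : Int) ∧ (13 : Int) < ((C : Nat) : Int)
        then (cbfG0 bd).flatten.set ((23 * ((C : Nat) : Int) + 13)).toNat 'S'
        else (cbfG0 bd).flatten)
      = ((cbfG0 bd).modify 23 (fun r => r.set 13 'S')).flatten := by
    rw [← flat_step (cbfG0 bd) C 23 13 'S' hg0rows]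
    refine if_congr (by omega) ?_ rfl
    have : ((23 * ((C : Nat) : Int) + 13)).toNat = 23 * C + 13 := by omega
    rw [this]
  rw [hS]
  set g1 := (cbfG0 bd).modify 23 (fun r => r.set 13 'S') with hg1
  have hg1len : g1.length = bd.length := by simp [hg1, hg0len]
  have hg1rows := inv_modify (cbfG0 bd) C 23 13 'S' hg0rows
  -- the four G patches
  have hGstep : ∀ (g : List (List Char)) (c : Nat), g.length = bd.length →
      (∀ j (h : j < g.length), g[j].length = C) → 11 < bd.length →
      (if ((c : Nat) : Int) < ((C : Nat) : Int)
        then g.flatten.set ((11 * ((C : Nat) : Int) + ((c : Nat) : Int))).toNat 'G'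
        else g.flatten)
      = (g.modify 11 (fun r => r.set c 'G')).flatten := by
    intro g c hlen hrows h11
    rw [← flat_step g C 11 c 'G' hrows]
    refine if_congr (by omega) ?_ rfl
    have : ((11 * ((C : Nat) : Int) + ((c : Nat) : Int))).toNat = 11 * C + c := by omega
    rw [this]
  by_cases h11 : (11 : Int) < (bd.length : Int)
  · have h11n : 11 < bd.length := by omega
    rw [if_pos h11]
    simp only [List.foldl_cons, List.foldl_nil]
    rw [show (13 : Int) = ((13 : Nat) : Int) by norm_num,
        hGstep g1 13 hg1len hg1rows h11n]
    set g2 := g1.modify 11 (fun r => r.set 13 'G') with hg2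
    have hg2len : g2.length = bd.length := by simp [hg2, hg1len]
    have hg2rows := inv_modify g1 C 11 13 'G' hg1rows
    rw [show (14 : Int) = ((14 : Nat) : Int) by norm_num,
        hGstep g2 14 hg2len hg2rows h11n]
    set g3 := g2.modify 11 (fun r => r.set 14 'G') with hg3
    have hg3len : g3.length = bd.length := by simp [hg3, hg2len]
    have hg3rows := inv_modify g2 C 11 14 'G' hg2rows
    rw [show (15 : Int) = ((15 : Nat) : Int) by norm_num,
        hGstep g3 15 hg3len hg3rows h11n]
    set g4 := g3.modify 11 (fun r => r.set 15 'G') with hg4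
    have hg4len : g4.length = bd.length := by simp [hg4, hg3len]
    have hg4rows := inv_modify g3 C 11 15 'G' hg3rows
    rw [show (16 : Int) = ((16 : Nat) : Int) by norm_num,
        hGstep g4 16 hg4len hg4rows h11n]
    set g5 := g4.modify 11 (fun r => r.set 16 'G') with hg5
    have hg5len : g5.length = bd.length := by simp [hg5, hg4len]
    have hg5rows := inv_modify g4 C 11 16 'G' hg4rows
    have hgrid : cbfGrid2 bd = g5 := by
      simp [cbfGrid2, hg5, hg4, hg3, hg2, hg1]
    rw [hgrid]
    rw [PySem.List.pyRange_zero_natCast, List.map_map, ← hg5len]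
    exact final_chunk g5 C hg5rows
  · rw [if_neg h11]
    have h11n : ¬ 11 < bd.length := by omega
    have hmod : ∀ (g : List (List Char)) (c : Nat) (ch : Char), g.length = bd.length →
        g.modify 11 (fun r => r.set c ch) = g := by
      intro g c ch hlen
      exact List.modify_eq_self (by omega)
    have hgrid : cbfGrid2 bd = g1 := by
      rw [cbfGrid2]
      rw [hmod _ 13 'G' (by simpa [hg1] using hg1len), hmod _ 14 'G' (by simpa [hg1] using hg1len),
          hmod _ 15 'G' (by simpa [hg1] using hg1len), hmod _ 16 'G' (by simpa [hg1] using hg1len)]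
    rw [hgrid]
    rw [PySem.List.pyRange_zero_natCast, List.map_map, ← hg1len]
    exact final_chunk g1 C hg1rows

-- ===== VERDICT (by name: the statement is the Claim_ definition above) =====
theorem convert_board_format_spec : Claim_equal_convert_board_format := by
  intro bd _ _
  unfold Spec_convert_board_format
  rw [A_eq_mid, B_eq_mid]
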